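-- pv_equiv track=rewrite | github.com/jjmonstro/DS-lab2 | DS/projetos/exercise15/05/exercises.py | true_true
-- ===== SOURCE A (Python) =====
-- def true_true(l) -> bool:
--
--     # for i in range(len(l)):
--     #     if l[0] == "-" or l=="+" or numeros:
--     #         a = True
--     #     elif l[i + 1] == letras:
--     #         a = False
--     letras="abcdefghijklmnopqrstuvwxyzABCDEFGHIJKLMNOPQRSTUVWXYZ"
--     a=True
--     for i in range(len(l)):
--         if l[i] in letras:
--             a = False
--             break
--     return a
-- ===== SOURCE B (Python) =====
-- def true_true(l) -> bool:
--     # A string contains no ASCII letters iff it is invariant under case mapping: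
--     # only letters change between lower() and upper(), everything else is fixed.
--     return l.lower() == l.upper()
-- ===== Notes on version B (the rewrite author's own statement) =====
-- stated objective: idiomatic
-- what changed: Drops the letter-membership scan entirely: B tests case-mapping invariance (l.lower() == l.upper()), since exactly the ASCII letters change under case mapping; no letter table, no index loop, no flag, no break.
import Mathlib
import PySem

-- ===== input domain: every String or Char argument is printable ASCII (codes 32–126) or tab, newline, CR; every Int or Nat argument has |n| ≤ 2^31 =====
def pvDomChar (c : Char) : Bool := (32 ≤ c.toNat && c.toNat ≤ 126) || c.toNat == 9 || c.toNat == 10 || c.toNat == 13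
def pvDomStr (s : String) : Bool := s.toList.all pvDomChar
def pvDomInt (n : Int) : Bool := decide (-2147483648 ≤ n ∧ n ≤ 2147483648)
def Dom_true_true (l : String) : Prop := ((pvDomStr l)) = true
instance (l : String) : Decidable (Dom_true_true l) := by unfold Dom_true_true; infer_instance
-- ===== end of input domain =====

-- B replaces A's letter-membership scan (flag + break) with one case-mapping invariance test: l.lower() == l.upper() (idiomatic, same cost).


-- ===== PORT A =====
-- letras = "abc…XYZ"; a = True; for i: if l[i] in letras: a = False; break — the loop with
-- its flag and break is the recursion below (false on first letter hit, flag's initial True at the end).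
def trueALetras : List Char := "abcdefghijklmnopqrstuvwxyzABCDEFGHIJKLMNOPQRSTUVWXYZ".toList

def trueALoop : List Char → Bool
  | [] => true
  | c :: rest => if trueALetras.contains c then false else trueALoop rest

def true_true (l : String) : Bool := trueALoop l.toList

-- ===== PORT B =====
-- return l.lower() == l.upper()
def true_true_alt (l : String) : Bool := PySem.Str.lower l == PySem.Str.upper l

-- ===== PRECONDITION & SPEC =====
def Spec_true_true (l : String) (out : Bool) : Prop := out = true_true_alt l
instance (l : String) (out : Bool) : Decidable (Spec_true_true l out) := by unfold Spec_true_true; infer_instance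

-- ===== CLAIM (what is proved, stated in full; the proofs are below) =====
def Claim_equal_true_true : Prop := ∀ (l : String), Dom_true_true l → Spec_true_true l (true_true l)

-- ===== LEMMAS AND PROOFS =====
theorem toNat_ofNat_valid (n : Nat) (h : n.isValidChar) : (Char.ofNat n).toNat = n := by
  rw [Char.ofNat, dif_pos h]
  simp [Char.ofNatAux]

-- A's letter table holds exactly the chars with code in [97,122] ∪ [65,90].
theorem mem_trueALetras_iff (c : Char) :
    c ∈ trueALetras ↔ (97 ≤ c.toNat ∧ c.toNat ≤ 122) ∨ (65 ≤ c.toNat ∧ c.toNat ≤ 90) := by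
  have hlist : trueALetras =
      ['a','b','c','d','e','f','g','h','i','j','k','l','m','n','o','p','q','r','s','t','u','v',
       'w','x','y','z','A','B','C','D','E','F','G','H','I','J','K','L','M','N','O','P','Q','R',
       'S','T','U','V','W','X','Y','Z'] := by decide
  rw [hlist]
  constructor
  · intro hm
    fin_cases hm <;> decide
  · intro hr
    have hc : c = Char.ofNat c.toNat := (Char.ofNat_toNat c).symm
    rw [hc]
    rcases hr with ⟨h1, h2⟩ | ⟨h1, h2⟩ <;> interval_cases c.toNat <;> decide

-- islower / isupper read off the same code intervals.
theorem islower_iff (c : Char) :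
    PySem.Chars.islower c = true ↔ 97 ≤ c.toNat ∧ c.toNat ≤ 122 := by
  simp only [PySem.Chars.islower, Bool.and_eq_true, decide_eq_true_eq, Char.le_def]
  exact Iff.rfl

theorem isupper_iff (c : Char) :
    PySem.Chars.isupper c = true ↔ 65 ≤ c.toNat ∧ c.toNat ≤ 90 := by
  simp only [PySem.Chars.isupper, Bool.and_eq_true, decide_eq_true_eq, Char.le_def]
  exact Iff.rfl

-- lowerChar and upperChar agree on a char exactly when it is not in A's letter table.
theorem lowerChar_eq_upperChar_iff (c : Char) :
    (PySem.Chars.lowerChar c == PySem.Chars.upperChar c) = !(trueALetras.contains c) := by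
  rw [Bool.eq_iff_iff, beq_iff_eq, Bool.not_eq_eq_eq_not, Bool.not_true,
    ← Bool.not_eq_true, List.contains_eq_mem, decide_eq_true_eq, mem_trueALetras_iff]
  by_cases hl : PySem.Chars.islower c = true
  · have hcode := (islower_iff c).mp hl
    have hu : ¬ PySem.Chars.isupper c = true := by
      rw [isupper_iff]; omega
    rw [PySem.Chars.lowerChar, PySem.Chars.upperChar, if_neg hu, if_pos hl]
    constructor
    · intro heq
      have hv : (c.toNat - 32).isValidChar := Or.inl (by omega)
      have ht := toNat_ofNat_valid _ hv
      rw [← heq] at ht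
      omega
    · intro hno
      exact absurd (Or.inl hcode) hno
  · by_cases hu : PySem.Chars.isupper c = true
    · have hcode := (isupper_iff c).mp hu
      rw [PySem.Chars.lowerChar, PySem.Chars.upperChar, if_pos hu, if_neg hl]
      constructor
      · intro heq
        have hv : (c.toNat + 32).isValidChar := Or.inl (by omega)
        have ht := toNat_ofNat_valid _ hv
        rw [heq] at ht
        omega
      · intro hno
        exact absurd (Or.inr hcode) hno
    · rw [PySem.Chars.lowerChar, PySem.Chars.upperChar, if_neg hu, if_neg hl]
      rw [islower_iff] at hl
      rw [isupper_iff] at hu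
      simp only [not_or, true_iff]
      omega

-- A's early-exit loop computes "every character is fixed by both case maps at once".
theorem trueALoop_eq (cs : List Char) :
    trueALoop cs = (PySem.Chars.lower cs == PySem.Chars.upper cs) := by
  induction cs with
  | nil => simp [trueALoop, PySem.Chars.lower, PySem.Chars.upper]
  | cons c rest ih =>
    have hc := lowerChar_eq_upperChar_iff c
    simp only [trueALoop, PySem.Chars.lower, PySem.Chars.upper, List.map_cons, List.cons_beq_cons]
    by_cases h : trueALetras.contains c = true
    · rw [h] at hc
      rw [if_pos h, hc]
      simp
    · rw [Bool.not_eq_true] at h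
      rw [h] at hc
      rw [if_neg (by rw [h]; exact Bool.false_ne_true), hc]
      simp only [Bool.not_false, Bool.true_and]
      simpa [PySem.Chars.lower, PySem.Chars.upper] using ih

-- ===== VERDICT (by name: the statement is the Claim_ definition above) =====
theorem true_true_spec : Claim_equal_true_true := by
  intro l _
  unfold Spec_true_true true_true true_true_alt
  rw [trueALoop_eq, Bool.eq_iff_iff, beq_iff_eq, beq_iff_eq, PySem.Str.lower, PySem.Str.upper]
  constructor
  · intro h; rw [h]
  · intro h
    simpa using congrArg String.toList h
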